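-- pv_equiv track=rewrite | github.com/Tim-Tadj/UniAlgorithims_CA | CA1/C1-Allocating-Shares.py | CEO_stock
-- ===== SOURCE A (Python) =====
-- def CEO_stock(n):
--     total =0
--     i = 1
--
--     #checks the difference between the current number and the next number if the number is greater then 1, it is repeated
--     while(((n//i)-(n//(i+1))) > 1):
--         #add the amount of of i's by (n//i)-n//(i+1)) times (the amount of times it occurs)
--         total += ((n//i)-n//(i+1))*i
--         i+=1
--
--     #for all numbers not repeated, add them
--     for j in range(1,(n//i+1)):
--         total+=n//j
--     return total
-- ===== SOURCE B (Python) =====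
-- def CEO_stock(n):
--     total = 0
--     i = 1
--     while i <= n:
--         q = n // i
--         j = n // q
--         total += q * (j - i + 1)
--         i = j + 1
--     return total
-- ===== Notes on version B (the rewrite author's own statement) =====
-- stated objective: simpler
-- what changed: A's two loops (a while over i accumulating (n//i - n//(i+1))*i plus a final for-loop summing n//j) are replaced by one divisor-block loop that, for each block of equal quotients q = n//i, jumps directly to j = n//q and adds q*(j-i+1).
import Mathlib
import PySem

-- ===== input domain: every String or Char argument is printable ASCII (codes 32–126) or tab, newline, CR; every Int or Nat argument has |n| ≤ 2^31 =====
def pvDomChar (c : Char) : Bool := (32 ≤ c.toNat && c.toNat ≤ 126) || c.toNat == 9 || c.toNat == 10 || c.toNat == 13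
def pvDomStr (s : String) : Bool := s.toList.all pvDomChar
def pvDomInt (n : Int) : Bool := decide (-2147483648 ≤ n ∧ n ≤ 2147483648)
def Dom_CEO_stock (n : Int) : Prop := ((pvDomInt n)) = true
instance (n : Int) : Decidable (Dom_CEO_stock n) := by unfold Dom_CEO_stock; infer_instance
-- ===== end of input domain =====

-- B replaces A's two loops (quotient-difference while loop plus a direct tail sum) by a single
-- divisor-block loop that jumps over runs of equal quotients; objective: simpler (same O(√n) cost).

-- ===== PORT A =====
-- the while loop of A; i = k+1 (i starts at 1 and only grows), followed by A's final for-loop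
def CEO_stock_loop (n total : Int) (k : Nat) : Int :=
  if PySem.Int.floordiv n ((k : Int) + 1) - PySem.Int.floordiv n ((k : Int) + 1 + 1) > 1 then
    CEO_stock_loop n
      (total + (PySem.Int.floordiv n ((k : Int) + 1) - PySem.Int.floordiv n ((k : Int) + 1 + 1)) * ((k : Int) + 1))
      (k + 1)
  else
    (PySem.List.pyRange 1 (PySem.Int.floordiv n ((k : Int) + 1) + 1)).foldl
      (fun t j => t + PySem.Int.floordiv n j) total
termination_by (PySem.Int.floordiv n ((k : Int) + 1)).toNat
decreasing_by
  rename_i h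
  push_cast
  have hi : (0 : Int) < (k : Int) + 1 := by positivity
  by_cases hq : 0 ≤ PySem.Int.floordiv n ((k : Int) + 1 + 1)
  · omega
  · exfalso
    -- fd n (i+1) < 0 forces fd n i ≤ fd n (i+1) + 1, contradicting h
    have h1 : n < (PySem.Int.floordiv n ((k : Int) + 1 + 1) + 1) * ((k : Int) + 1 + 1) :=
      (PySem.Int.floordiv_lt_iff_lt_mul (by omega)).mp (by omega)
    have h2 : PySem.Int.floordiv n ((k : Int) + 1) <
        PySem.Int.floordiv n ((k : Int) + 1 + 1) + 2 :=
      (PySem.Int.floordiv_lt_iff_lt_mul hi).mpr (by nlinarith)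
    omega

def CEO_stock (n : Int) : Int := CEO_stock_loop n 0 0

-- ===== PORT B =====
-- B's single while loop: i = k+1, q = n//i, j = n//q, jump to i = j+1
def CEO_stock_alt_loop (n total : Int) (k : Nat) : Int :=
  if h : (k : Int) + 1 ≤ n then
    CEO_stock_alt_loop n
      (total + PySem.Int.floordiv n ((k : Int) + 1) *
        (PySem.Int.floordiv n (PySem.Int.floordiv n ((k : Int) + 1)) - ((k : Int) + 1) + 1))
      (PySem.Int.floordiv n (PySem.Int.floordiv n ((k : Int) + 1))).toNat
  else total
termination_by n.toNat - k
decreasing_by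
  have hi : (0 : Int) < (k : Int) + 1 := by positivity
  have hq : 1 ≤ PySem.Int.floordiv n ((k : Int) + 1) :=
    (PySem.Int.le_floordiv_iff_mul_le hi).mpr (by omega)
  have hj : (k : Int) + 1 ≤ PySem.Int.floordiv n (PySem.Int.floordiv n ((k : Int) + 1)) :=
    (PySem.Int.le_floordiv_iff_mul_le (by omega)).mpr
      (by have := (PySem.Int.le_floordiv_iff_mul_le hi).mp
            (le_refl (PySem.Int.floordiv n ((k : Int) + 1)))
          nlinarith)
  omega

def CEO_stock_alt (n : Int) : Int := CEO_stock_alt_loop n 0 0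

-- ===== PRECONDITION & SPEC =====
def Spec_CEO_stock (n : Int) (out : Int) : Prop := out = CEO_stock_alt n
instance (n : Int) (out : Int) : Decidable (Spec_CEO_stock n out) := by unfold Spec_CEO_stock; infer_instance

-- ===== CLAIM (what is proved, stated in full; the proofs are below) =====
def Claim_equal_CEO_stock : Prop := ∀ (n : Int), Dom_CEO_stock n → Spec_CEO_stock n (CEO_stock n)

-- ===== LEMMAS AND PROOFS =====

-- n // 1 = n
theorem pv_fd_one (n : Int) : PySem.Int.floordiv n 1 = n := by
  rw [PySem.Int.floordiv_eq_iff_of_pos (by norm_num)]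
  constructor <;> nlinarith

theorem pv_fd_nonneg (n b : Int) (hn : 0 ≤ n) (hb : 0 < b) : 0 ≤ PySem.Int.floordiv n b :=
  (PySem.Int.le_floordiv_iff_mul_le hb).mpr (by nlinarith)

theorem pv_fd_anti (n b : Int) (hn : 0 ≤ n) (hb : 0 < b) :
    PySem.Int.floordiv n (b + 1) ≤ PySem.Int.floordiv n b := by
  have h1 : PySem.Int.floordiv n (b + 1) * (b + 1) ≤ n :=
    (PySem.Int.le_floordiv_iff_mul_le (by omega)).mp le_rfl
  have h0 : 0 ≤ PySem.Int.floordiv n (b + 1) := pv_fd_nonneg n (b + 1) hn (by omega)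
  exact (PySem.Int.le_floordiv_iff_mul_le hb).mpr (by nlinarith)

theorem pv_fd_zero (n b : Int) (hn : 0 ≤ n) (hb : n < b) : PySem.Int.floordiv n b = 0 := by
  rw [PySem.Int.floordiv_eq_iff_of_pos (by omega)]
  constructor <;> nlinarith

-- split a sum over Ioc at a midpoint
theorem pv_sum_split (f : Int → Int) (a b c : Int) (hab : a ≤ b) (hbc : b ≤ c) :
    ∑ m ∈ Finset.Ioc a c, f m = ∑ m ∈ Finset.Ioc a b, f m + ∑ m ∈ Finset.Ioc b c, f m := by
  rw [← Finset.Ioc_union_Ioc_eq_Ioc hab hbc, Finset.sum_union]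
  exact Finset.disjoint_left.mpr fun x hx hx' => by
    rw [Finset.mem_Ioc] at hx hx'; omega

theorem pv_Ioc_singleton (a : Int) : Finset.Ioc a (a + 1) = {a + 1} := by
  ext x
  simp only [Finset.mem_Ioc, Finset.mem_singleton]
  omega

-- a sum of equal terms over Ioc
theorem pv_sum_const (f : Int → Int) (a b q : Int) (hab : a ≤ b)
    (h : ∀ m ∈ Finset.Ioc a b, f m = q) :
    ∑ m ∈ Finset.Ioc a b, f m = q * (b - a) := by
  rw [Finset.sum_congr rfl h, Finset.sum_const, Int.card_Ioc, nsmul_eq_mul]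
  rw [Int.toNat_of_nonneg (by omega)]
  ring

-- A's final for-loop is the sum of n//j for j = 1..m  (Nat-indexed form)
theorem pv_foldA_nat (n : Int) : ∀ (k : Nat) (t : Int),
    (PySem.List.pyRange 1 ((k : Int) + 1)).foldl (fun t j => t + PySem.Int.floordiv n j) t
      = t + ∑ j ∈ Finset.Ioc 0 (k : Int), PySem.Int.floordiv n j := by
  intro k
  induction k with
  | zero => intro t; rw [PySem.List.pyRange_one_eq_nil (by norm_num)]; simp
  | succ k ih =>
    intro t
    have hsp : PySem.List.pyRange 1 (((k : Int) + 1) + 1)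
        = PySem.List.pyRange 1 ((k : Int) + 1) ++ [(k : Int) + 1] :=
      PySem.List.pyRange_one_succ_right (by omega)
    push_cast
    rw [hsp, List.foldl_append, ih t]
    simp only [List.foldl_cons, List.foldl_nil]
    rw [pv_sum_split _ 0 (k : Int) ((k : Int) + 1) (by omega) (by omega),
      pv_Ioc_singleton, Finset.sum_singleton]
    ring

theorem pv_foldA (n m : Int) (hm : 0 ≤ m) (t : Int) :
    (PySem.List.pyRange 1 (m + 1)).foldl (fun t j => t + PySem.Int.floordiv n j) t
      = t + ∑ j ∈ Finset.Ioc 0 m, PySem.Int.floordiv n j := by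
  obtain ⟨k, rfl⟩ := Int.eq_ofNat_of_zero_le hm
  exact pv_foldA_nat n k t

-- hyperbola tail identity: Σ_{j=1..n//(k+1)} n//j = Σ_{m=k+1..n} n//m + k·(n//(k+1))
theorem pv_hyperbola (n : Int) (hn : 0 ≤ n) : ∀ k : Nat,
    ∑ j ∈ Finset.Ioc 0 (PySem.Int.floordiv n ((k : Int) + 1)), PySem.Int.floordiv n j
      = ∑ m ∈ Finset.Ioc (k : Int) n, PySem.Int.floordiv n m
        + (k : Int) * PySem.Int.floordiv n ((k : Int) + 1) := by
  intro k
  induction k with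
  | zero => simp
  | succ k ih =>
    push_cast
    set i : Int := (k : Int) + 1 with hidef
    by_cases hin : i ≤ n
    · have h0 : (0 : Int) < i := by omega
      have hnn : 0 ≤ PySem.Int.floordiv n (i + 1) := pv_fd_nonneg n (i + 1) hn (by omega)
      have hanti : PySem.Int.floordiv n (i + 1) ≤ PySem.Int.floordiv n i := pv_fd_anti n i hn h0
      -- every m with n//(i+1) < m ≤ n//i has n//m = i
      have hblk : ∀ m ∈ Finset.Ioc (PySem.Int.floordiv n (i + 1)) (PySem.Int.floordiv n i),
          PySem.Int.floordiv n m = i := by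
        intro m hm
        rw [Finset.mem_Ioc] at hm
        have hmpos : (0 : Int) < m := by omega
        rw [PySem.Int.floordiv_eq_iff_of_pos hmpos]
        constructor
        · have := (PySem.Int.le_floordiv_iff_mul_le h0).mp hm.2
          nlinarith
        · have : ¬ (m * (i + 1) ≤ n) := fun hc =>
            absurd ((PySem.Int.le_floordiv_iff_mul_le (by omega)).mpr hc) (by omega)
          nlinarith
      have e1 : ∑ j ∈ Finset.Ioc 0 (PySem.Int.floordiv n i), PySem.Int.floordiv n j
          = ∑ j ∈ Finset.Ioc 0 (PySem.Int.floordiv n (i + 1)), PySem.Int.floordiv n j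
            + ∑ j ∈ Finset.Ioc (PySem.Int.floordiv n (i + 1)) (PySem.Int.floordiv n i),
                PySem.Int.floordiv n j :=
        pv_sum_split _ _ _ _ hnn hanti
      have e2 : ∑ j ∈ Finset.Ioc (PySem.Int.floordiv n (i + 1)) (PySem.Int.floordiv n i),
          PySem.Int.floordiv n j
          = i * (PySem.Int.floordiv n i - PySem.Int.floordiv n (i + 1)) :=
        pv_sum_const _ _ _ _ hanti hblk
      have e4 : ∑ m ∈ Finset.Ioc (k : Int) n, PySem.Int.floordiv n m
          = PySem.Int.floordiv n i + ∑ m ∈ Finset.Ioc i n, PySem.Int.floordiv n m := by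
        rw [pv_sum_split _ (k : Int) i n (by omega) hin, hidef, pv_Ioc_singleton,
          Finset.sum_singleton]
      rw [hidef] at ih ⊢
      rw [e1, e2, e4] at ih
      linarith
    · -- i > n : both sides are 0
      have hz1 : PySem.Int.floordiv n (i + 1) = 0 := pv_fd_zero n (i + 1) hn (by omega)
      have hz : Finset.Ioc i n = (∅ : Finset Int) := Finset.Ioc_eq_empty (by omega)
      rw [hz1, hz]
      simp

-- invariant of A's while loop
theorem pv_loopA (n : Int) (hn : 0 ≤ n) : ∀ (total : Int) (k : Nat),
    CEO_stock_loop n total k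
      = total + (k : Int) * PySem.Int.floordiv n ((k : Int) + 1)
        + ∑ m ∈ Finset.Ioc (k : Int) n, PySem.Int.floordiv n m := by
  intro total k
  fun_induction CEO_stock_loop n total k with
  | case1 total k h ih =>
    have h0 : (0 : Int) < (k : Int) + 1 := by positivity
    have hnn : 0 ≤ PySem.Int.floordiv n ((k : Int) + 1 + 1) :=
      pv_fd_nonneg n ((k : Int) + 1 + 1) hn (by omega)
    have h2 : 2 * ((k : Int) + 1) ≤ n :=
      (PySem.Int.le_floordiv_iff_mul_le h0).mp (by omega)
    have hin : (k : Int) + 1 ≤ n := by omega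
    have e4 : ∑ m ∈ Finset.Ioc (k : Int) n, PySem.Int.floordiv n m
        = PySem.Int.floordiv n ((k : Int) + 1)
          + ∑ m ∈ Finset.Ioc ((k : Int) + 1) n, PySem.Int.floordiv n m := by
      rw [pv_sum_split _ (k : Int) ((k : Int) + 1) n (by omega) hin, pv_Ioc_singleton,
        Finset.sum_singleton]
    rw [ih]
    push_cast
    rw [e4]
    ring
  | case2 total k h =>
    have hnn : 0 ≤ PySem.Int.floordiv n ((k : Int) + 1) :=
      pv_fd_nonneg n ((k : Int) + 1) hn (by positivity)
    rw [pv_foldA n _ hnn total, pv_hyperbola n hn k]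
    ring

-- invariant of B's block loop
theorem pv_loopB (n : Int) (_hn : 0 ≤ n) : ∀ (total : Int) (k : Nat),
    CEO_stock_alt_loop n total k
      = total + ∑ m ∈ Finset.Ioc (k : Int) n, PySem.Int.floordiv n m := by
  intro total k
  fun_induction CEO_stock_alt_loop n total k with
  | case1 total k h ih =>
    have h0 : (0 : Int) < (k : Int) + 1 := by positivity
    set q : Int := PySem.Int.floordiv n ((k : Int) + 1) with hqdef
    have hq1 : 1 ≤ q := (PySem.Int.le_floordiv_iff_mul_le h0).mpr (by omega)
    set j : Int := PySem.Int.floordiv n q with hjdef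
    have hqi : q * ((k : Int) + 1) ≤ n := (PySem.Int.le_floordiv_iff_mul_le h0).mp le_rfl
    have hji : (k : Int) + 1 ≤ j :=
      (PySem.Int.le_floordiv_iff_mul_le (by omega)).mpr (by nlinarith)
    have hjq : j * q ≤ n := (PySem.Int.le_floordiv_iff_mul_le (by omega)).mp le_rfl
    have hjn : j ≤ n := by nlinarith
    have hcast : ((j.toNat : Nat) : Int) = j := Int.toNat_of_nonneg (by omega)
    have hblk : ∀ m ∈ Finset.Ioc (k : Int) j, PySem.Int.floordiv n m = q := by
      intro m hm
      rw [Finset.mem_Ioc] at hm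
      have hmpos : (0 : Int) < m := by omega
      rw [PySem.Int.floordiv_eq_iff_of_pos hmpos]
      constructor
      · nlinarith
      · have hlt : n < (q + 1) * ((k : Int) + 1) :=
          ((PySem.Int.floordiv_eq_iff_of_pos h0).mp hqdef.symm).2
        nlinarith
    rw [ih, hcast]
    rw [pv_sum_split _ (k : Int) j n (by omega) hjn,
      pv_sum_const _ _ _ _ (by omega) hblk]
    ring
  | case2 total k h =>
    have hz : Finset.Ioc (k : Int) n = (∅ : Finset Int) := Finset.Ioc_eq_empty (by omega)
    rw [hz]
    simp

-- ===== VERDICT (by name: the statement is the Claim_ definition above) =====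
theorem CEO_stock_spec : Claim_equal_CEO_stock := by
  intro n _
  unfold Spec_CEO_stock CEO_stock CEO_stock_alt
  by_cases hn : 0 ≤ n
  · rw [pv_loopA n hn 0 0, pv_loopB n hn 0 0]
    push_cast
    ring
  · -- n < 0 : A's while condition is false, its for-range is empty, B's loop does not start
    have hb : CEO_stock_alt_loop n 0 0 = 0 := by
      rw [CEO_stock_alt_loop]
      push_cast
      rw [dif_neg (by omega)]
    have h2 := (PySem.Int.floordiv_eq_iff_of_pos (by norm_num : (0:Int) < 2)).mp
      (rfl : PySem.Int.floordiv n 2 = PySem.Int.floordiv n 2)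
    have hcond : ¬ (PySem.Int.floordiv n (((0:Nat) : Int) + 1)
        - PySem.Int.floordiv n (((0:Nat) : Int) + 1 + 1) > 1) := by
      push_cast
      rw [pv_fd_one n]
      omega
    rw [CEO_stock_loop, if_neg hcond]
    push_cast
    rw [pv_fd_one n, PySem.List.pyRange_one_eq_nil (by omega)]
    simp [hb]
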